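-- pv_equiv track=rewrite | github.com/ktomoe/storegate | storegate/agent/random_search_agent.py | _combination_from_index
-- ===== SOURCE A (Python) =====
-- from typing import Any
--
-- def _combination_from_index(
--     keys: list[str],
--     values: list[list[Any]],
--     index: int,
-- ) -> dict[str, Any]:
--     selected: list[Any] = [None] * len(values)
--     for ii in range(len(values) - 1, -1, -1):
--         index, offset = divmod(index, len(values[ii]))
--         selected[ii] = values[ii][offset]
--     return dict(zip(keys, selected))
-- ===== SOURCE B (Python) =====
-- from typing import Any
--
-- def _combination_from_index(
--     keys: list[str],
--     values: list[list[Any]],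
--     index: int,
-- ) -> dict[str, Any]:
--     # place-value table: strides[i] = product of len(values[j]) for j > i
--     strides: list[int] = []
--     acc = 1
--     for vals in reversed(values):
--         strides.append(acc)
--         acc *= len(vals)
--     strides.reverse()
--     selected = [vals[(index // s) % len(vals)]
--                 for vals, s in zip(values, strides)]
--     return dict(zip(keys, selected))
-- ===== Notes on version B (the rewrite author's own statement) =====
-- stated objective: alternative
-- what changed: Replaces the sequential index-mutating divmod loop with a precomputed suffix-product stride table and a stateless per-dimension (index // stride) % len pass.
import Mathlib
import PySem

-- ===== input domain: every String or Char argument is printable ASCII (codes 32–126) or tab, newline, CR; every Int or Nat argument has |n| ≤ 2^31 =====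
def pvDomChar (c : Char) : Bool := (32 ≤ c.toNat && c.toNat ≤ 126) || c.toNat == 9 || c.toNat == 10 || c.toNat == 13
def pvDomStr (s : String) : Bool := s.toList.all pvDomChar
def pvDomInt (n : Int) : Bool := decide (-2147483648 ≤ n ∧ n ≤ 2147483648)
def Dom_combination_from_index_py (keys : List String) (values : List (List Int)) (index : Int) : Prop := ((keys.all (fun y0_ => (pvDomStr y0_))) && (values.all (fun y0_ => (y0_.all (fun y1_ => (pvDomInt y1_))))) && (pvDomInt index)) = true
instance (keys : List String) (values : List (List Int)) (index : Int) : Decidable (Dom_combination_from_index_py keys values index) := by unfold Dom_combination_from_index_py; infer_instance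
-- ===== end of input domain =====

-- B replaces A's sequential divmod loop by a precomputed stride table and a stateless
-- modular pass per dimension (objective: alternative decomposition, same cost).

-- ===== PORT A =====
-- A's loop runs ii = len-1 .. 0, carrying `index` and writing selected[ii]; this is the
-- obvious structural recursion: recurse on the tail first (higher ii processed first),
-- then consume the head with divmod. Element access values[ii][offset] via pyGet? (getD
-- default is unreachable when the row is nonempty, as offset = index % len ∈ [0, len)).
def pyAGo (values : List (List Int)) (index : Int) : Int × List Int :=
  match values with
  | [] => (index, [])
  | v :: rest =>
      let (idx', sel) := pyAGo rest index
      let q := PySem.Int.floordiv idx' (v.length : Int)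
      let offset := PySem.Int.mod idx' (v.length : Int)
      (q, (PySem.List.pyGet? v offset).getD 0 :: sel)

def combination_from_index_py (keys : List String) (values : List (List Int)) (index : Int) : List (String × Int) :=
  let selected := (pyAGo values index).2
  (PySem.Dict.ofList (keys.zip selected)).items   -- dict(zip(keys, selected))

-- ===== PORT B =====
def combination_from_index_py_alt (keys : List String) (values : List (List Int)) (index : Int) : List (String × Int) :=
  -- build strides by one reverse pass accumulating a running product
  let p := values.reverse.foldl
      (fun (st : Int × List Int) v => (st.1 * (v.length : Int), st.2 ++ [st.1])) (1, [])
  let strides := p.2.reverse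
  -- stateless pass: selected[i] = values[i][(index // strides[i]) % len(values[i])]
  let selected := (values.zip strides).map (fun vs =>
      let off := PySem.Int.mod (PySem.Int.floordiv index vs.2) (vs.1.length : Int)
      (PySem.List.pyGet? vs.1 off).getD 0)
  (PySem.Dict.ofList (keys.zip selected)).items   -- dict(zip(keys, selected))

-- ===== PRECONDITION & SPEC =====
-- Pre_ excludes inputs where some dimension is empty: there both A and B raise ZeroDivisionError.
def Pre_combination_from_index_py (keys : List String) (values : List (List Int)) (index : Int) : Prop :=
  ∀ v ∈ values, v ≠ []
instance (keys : List String) (values : List (List Int)) (index : Int) : Decidable (Pre_combination_from_index_py keys values index) := by unfold Pre_combination_from_index_py; infer_instance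

def pvWitness_combination_from_index_py : List String × List (List Int) × Int :=
  (["a", "b"], [[10, 20], [3, 4, 5]], 5)

def Spec_combination_from_index_py (keys : List String) (values : List (List Int)) (index : Int) (out : List (String × Int)) : Prop := out = combination_from_index_py_alt keys values index
instance (keys : List String) (values : List (List Int)) (index : Int) (out : List (String × Int)) : Decidable (Spec_combination_from_index_py keys values index out) := by unfold Spec_combination_from_index_py; infer_instance

-- ===== CLAIM (what is proved, stated in full; the proofs are below) =====
def Claim_equal_combination_from_index_py : Prop := ∀ (keys : List String) (values : List (List Int)) (index : Int), Dom_combination_from_index_py keys values index → Pre_combination_from_index_py keys values index → Spec_combination_from_index_py keys values index (combination_from_index_py keys values index)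

-- ===== LEMMAS AND PROOFS =====

-- product of the dimension lengths
def pvProdLens (values : List (List Int)) : Int :=
  (values.map (fun v => (v.length : Int))).prod

-- reference stride list: entry i is prodLens of the suffix after i, scaled by a
def pvRevGo (a : Int) (l : List (List Int)) : List Int :=
  match l with
  | [] => []
  | v :: rest => a :: pvRevGo (a * (v.length : Int)) rest

def pvStridesOf (a : Int) (l : List (List Int)) : List Int :=
  match l with
  | [] => []
  | _v :: rest => a * pvProdLens rest :: pvStridesOf a rest

lemma pvProdLens_pos (values : List (List Int)) (h : ∀ v ∈ values, v ≠ []) :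
    0 < pvProdLens values := by
  induction values with
  | nil => simp [pvProdLens]
  | cons v rest ih =>
      have hv : v ≠ [] := h v (by simp)
      have hlen : 0 < (v.length : Int) := by
        have : v.length ≠ 0 := by simpa using hv
        omega
      have := ih (fun w hw => h w (by simp [hw]))
      simp only [pvProdLens, List.map_cons, List.prod_cons] at *
      positivity

lemma pvProdLens_reverse (l : List (List Int)) :
    pvProdLens l.reverse = pvProdLens l := by
  simp [pvProdLens, List.map_reverse]

lemma pv_foldl_strides (l : List (List Int)) : ∀ (a : Int) (s : List Int),
    l.foldl (fun (st : Int × List Int) v => (st.1 * (v.length : Int), st.2 ++ [st.1])) (a, s)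
      = (a * pvProdLens l, s ++ pvRevGo a l) := by
  induction l with
  | nil => intro a s; simp [pvProdLens, pvRevGo]
  | cons v rest ih =>
      intro a s
      simp only [List.foldl_cons, pvRevGo, pvProdLens, List.map_cons, List.prod_cons]
      rw [ih]
      simp [pvProdLens, mul_assoc, List.append_assoc]

lemma pvRevGo_append (xs ys : List (List Int)) : ∀ a,
    pvRevGo a (xs ++ ys) = pvRevGo a xs ++ pvRevGo (a * pvProdLens xs) ys := by
  induction xs with
  | nil => intro a; simp [pvRevGo, pvProdLens]
  | cons v rest ih =>
      intro a
      simp only [List.cons_append, pvRevGo, ih, pvProdLens, List.map_cons, List.prod_cons]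
      rw [mul_assoc]

lemma pvRevGo_reverse (l : List (List Int)) : ∀ a,
    (pvRevGo a l.reverse).reverse = pvStridesOf a l := by
  induction l with
  | nil => intro a; simp [pvRevGo, pvStridesOf]
  | cons v rest ih =>
      intro a
      have : (v :: rest).reverse = rest.reverse ++ [v] := by simp
      rw [this, pvRevGo_append]
      simp only [pvRevGo, List.reverse_append, List.reverse_cons, List.reverse_nil,
        List.nil_append, List.cons_append, pvStridesOf]
      rw [ih, pvProdLens_reverse]

-- Python floor division composes for positive divisors
lemma pv_fdiv_fdiv (a b c : Int) (hb : 0 < b) (hc : 0 < c) :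
    PySem.Int.floordiv (PySem.Int.floordiv a b) c = PySem.Int.floordiv a (b * c) := by
  rw [PySem.Int.floordiv_eq_ediv_of_pos hb, PySem.Int.floordiv_eq_ediv_of_pos hc,
      PySem.Int.floordiv_eq_ediv_of_pos (by positivity)]
  exact Int.ediv_ediv_of_nonneg (le_of_lt hb)

-- A's carried-state recursion computes exactly B's stateless digits
lemma pvAGo_spec (values : List (List Int)) (index : Int)
    (h : ∀ v ∈ values, v ≠ []) :
    pyAGo values index =
      (PySem.Int.floordiv index (pvProdLens values),
       (values.zip (pvStridesOf 1 values)).map (fun vs =>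
          (PySem.List.pyGet? vs.1
            (PySem.Int.mod (PySem.Int.floordiv index vs.2) (vs.1.length : Int))).getD 0)) := by
  induction values with
  | nil =>
      simp [pyAGo, pvProdLens, pvStridesOf, PySem.Int.floordiv]
  | cons v rest ih =>
      have hrest : ∀ w ∈ rest, w ≠ [] := fun w hw => h w (by simp [hw])
      have hP : 0 < pvProdLens rest := pvProdLens_pos rest hrest
      have hv : v ≠ [] := h v (by simp)
      have hL : 0 < (v.length : Int) := by
        have : v.length ≠ 0 := by simpa using hv
        omega
      simp only [pyAGo, ih hrest, pvStridesOf, List.zip_cons_cons, List.map_cons, one_mul]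
      rw [pv_fdiv_fdiv index (pvProdLens rest) (v.length : Int) hP hL]
      simp [pvProdLens, mul_comm]

-- ===== VERDICT (by name: the statement is the Claim_ definition above) =====
theorem combination_from_index_py_spec : Claim_equal_combination_from_index_py := by
  intro keys values index _ hpre
  unfold Spec_combination_from_index_py
  simp only [combination_from_index_py, combination_from_index_py_alt,
    pv_foldl_strides, List.nil_append, pvRevGo_reverse,
    pvAGo_spec values index hpre]
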